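-- pv_equiv track=rewrite | github.com/devanupriyj-code/pharmaguard | ai-model/medicine_analyzer.py | check_medicines
-- ===== SOURCE A (Python) =====
-- def check_medicines(medicines):
--     medicine_db = {
--         "crocin": ["paracetamol"],
--         "combiflam": ["ibuprofen", "paracetamol"],
--         "aspirin": ["acetylsalicylic acid"]
--     }
--
--     ingredients = []
--     warnings = []
--
--     for med in medicines:
--         med = med.lower()
--         if med in medicine_db:
--             ingredients.extend(medicine_db[med])
--
--     # Check duplicate ingredients
--     duplicates = set([x for x in ingredients if ingredients.count(x) > 1])
--
--     if duplicates:
--         warnings.append(f"Duplicate ingredient risk: {', '.join(duplicates)}")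
--
--     return {
--         "ingredients": ingredients,
--         "warnings": warnings
--     }
-- ===== SOURCE B (Python) =====
-- def check_medicines(medicines):
--     medicine_db = {
--         "crocin": ["paracetamol"],
--         "combiflam": ["ibuprofen", "paracetamol"],
--         "aspirin": ["acetylsalicylic acid"]
--     }
--
--     ingredients = []
--     seen = set()
--     duplicates = []
--
--     for med in medicines:
--         for ing in medicine_db.get(med.lower(), []):
--             ingredients.append(ing)
--             if ing in seen:
--                 if ing not in duplicates:
--                     duplicates.append(ing)
--             else:
--                 seen.add(ing)
--
--     warnings = []
--     if duplicates:
--         warnings.append(f"Duplicate ingredient risk: {', '.join(duplicates)}")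
--
--     return {
--         "ingredients": ingredients,
--         "warnings": warnings
--     }
-- ===== Notes on version B (the rewrite author's own statement) =====
-- stated objective: simpler
-- what changed: One pass: B builds the ingredient list and detects duplicates on the fly with a seen-set (recording each duplicate once, in order of its second occurrence), instead of A's second phase that rescans the built list with ingredients.count(x) for every element and joins a hash-ordered set.
import Mathlib
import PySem

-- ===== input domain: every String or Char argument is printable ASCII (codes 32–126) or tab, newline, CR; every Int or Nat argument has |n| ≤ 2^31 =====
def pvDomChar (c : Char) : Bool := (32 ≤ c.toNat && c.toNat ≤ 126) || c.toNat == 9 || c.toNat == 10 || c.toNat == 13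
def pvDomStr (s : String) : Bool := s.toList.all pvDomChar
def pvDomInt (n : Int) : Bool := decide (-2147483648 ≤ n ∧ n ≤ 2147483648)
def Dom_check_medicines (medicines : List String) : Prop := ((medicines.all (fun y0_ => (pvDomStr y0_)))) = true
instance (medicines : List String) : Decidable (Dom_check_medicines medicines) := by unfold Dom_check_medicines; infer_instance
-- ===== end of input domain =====

-- B merges A's two phases (build ingredient list, then rescan it with .count per element) into one
-- pass that records duplicates on the fly; return values proved equal on Pre_.

-- ===== PORT A =====
-- the module-level dict literal medicine_db (shared by both ports: same constant in both Pythons)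
def pvDb : PySem.Dict String (List String) :=
  PySem.Dict.ofList [("crocin", ["paracetamol"]), ("combiflam", ["ibuprofen", "paracetamol"]),
    ("aspirin", ["acetylsalicylic acid"])]

def check_medicines (medicines : List String) : List (String × List String) :=
  let ingredients := medicines.foldl (fun acc med =>
    let med := PySem.Str.lower med
    if pvDb.contains med then acc ++ pvDb.getD med [] else acc) []
  let duplicates : PySem.Set String :=
    PySem.Set.ofList (ingredients.filter (fun x => 1 < PySem.List.count ingredients x))
  let warnings : List String :=
    if duplicates = [] then [] else ["Duplicate ingredient risk: " ++ PySem.Str.join ", " duplicates]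
  [("ingredients", ingredients), ("warnings", warnings)]

-- ===== PORT B =====
-- the body of B's inner loop: append the ingredient, check it against `seen`, record a new duplicate
def pvStep (st : List String × PySem.Set String × List String) (ing : String) :
    List String × PySem.Set String × List String :=
  if PySem.Set.contains st.2.1 ing then
    (st.1 ++ [ing], st.2.1, if ing ∈ st.2.2 then st.2.2 else st.2.2 ++ [ing])
  else
    (st.1 ++ [ing], PySem.Set.add st.2.1 ing, st.2.2)

def check_medicines_alt (medicines : List String) : List (String × List String) :=
  let st := medicines.foldl
    (fun st med => (pvDb.getD (PySem.Str.lower med) []).foldl pvStep st)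
    ([], PySem.Set.empty, [])
  let warnings : List String :=
    if st.2.2 = [] then [] else ["Duplicate ingredient risk: " ++ PySem.Str.join ", " st.2.2]
  [("ingredients", st.1), ("warnings", warnings)]

-- ===== PRECONDITION & SPEC =====
-- Pre_ excludes inputs whose mapped ingredients contain two or more DISTINCT duplicated ingredients:
-- there A's warning joins a multi-element Python set, whose element order is hash-randomised set
-- iteration order (varies between runs), so no fixed value can be claimed; B lists such duplicates
-- in order of their second occurrence.
def Pre_check_medicines (medicines : List String) : Prop :=
  let lc := medicines.map PySem.Str.lower
  ¬ ((2 ≤ lc.count "crocin" + lc.count "combiflam" ∧ 2 ≤ lc.count "combiflam") ∨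
     (2 ≤ lc.count "crocin" + lc.count "combiflam" ∧ 2 ≤ lc.count "aspirin") ∨
     (2 ≤ lc.count "combiflam" ∧ 2 ≤ lc.count "aspirin"))
instance (medicines : List String) : Decidable (Pre_check_medicines medicines) := by
  unfold Pre_check_medicines; infer_instance

def pvWitness_check_medicines : List String := ["crocin", "Combiflam"]

def Spec_check_medicines (medicines : List String) (out : List (String × List String)) : Prop :=
  out = check_medicines_alt medicines
instance (medicines : List String) (out : List (String × List String)) :
    Decidable (Spec_check_medicines medicines out) := by unfold Spec_check_medicines; infer_instance

-- ===== CLAIM (what is proved, stated in full; the proofs are below) =====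
def Claim_equal_check_medicines : Prop := ∀ (medicines : List String),
  Dom_check_medicines medicines → Pre_check_medicines medicines →
  Spec_check_medicines medicines (check_medicines medicines)

-- ===== LEMMAS AND PROOFS =====

-- the full ingredient list both programs build, as a flatMap
def pvL (ms : List String) : List String := ms.flatMap (fun m => pvDb.getD (PySem.Str.lower m) [])

lemma pvLook_cases (k : String) :
    pvDb.getD k [] =
      if k = "crocin" then ["paracetamol"]
      else if k = "combiflam" then ["ibuprofen", "paracetamol"]
      else if k = "aspirin" then ["acetylsalicylic acid"]
      else [] := by
  have hdb : pvDb = PySem.Dict.mk [("crocin", ["paracetamol"]),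
      ("combiflam", ["ibuprofen", "paracetamol"]), ("aspirin", ["acetylsalicylic acid"])] := rfl
  by_cases h1 : k = "crocin"
  · subst h1; decide
  by_cases h2 : k = "combiflam"
  · subst h2; decide
  by_cases h3 : k = "aspirin"
  · subst h3; decide
  rw [if_neg h1, if_neg h2, if_neg h3, hdb, PySem.Dict.getD_eq_get?_getD]
  simp only [PySem.Dict.get?_mk_cons]
  rw [if_neg (by simp [beq_iff_eq]; exact fun h => h1 h.symm),
      if_neg (by simp [beq_iff_eq]; exact fun h => h2 h.symm),
      if_neg (by simp [beq_iff_eq]; exact fun h => h3 h.symm)]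
  rfl

lemma pvElem (ms : List String) (x : String) (hx : x ∈ pvL ms) :
    x = "paracetamol" ∨ x = "ibuprofen" ∨ x = "acetylsalicylic acid" := by
  simp only [pvL, List.mem_flatMap] at hx
  obtain ⟨m, _, hm⟩ := hx
  rw [pvLook_cases] at hm
  split_ifs at hm <;> simp at hm <;> tauto

lemma pvCount_p (ms : List String) :
    List.count "paracetamol" (pvL ms) =
      List.count "crocin" (ms.map PySem.Str.lower) + List.count "combiflam" (ms.map PySem.Str.lower) := by
  induction ms with
  | nil => simp [pvL]
  | cons m t ih =>
    simp only [pvL, List.flatMap_cons, List.count_append, List.map_cons, List.count_cons] at *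
    rw [pvLook_cases (PySem.Str.lower m)]
    split_ifs with h1 h2 h3 <;> (simp_all; try omega)

lemma pvCount_i (ms : List String) :
    List.count "ibuprofen" (pvL ms) = List.count "combiflam" (ms.map PySem.Str.lower) := by
  induction ms with
  | nil => simp [pvL]
  | cons m t ih =>
    simp only [pvL, List.flatMap_cons, List.count_append, List.map_cons, List.count_cons] at *
    rw [pvLook_cases (PySem.Str.lower m)]
    split_ifs with h1 h2 h3 <;> (simp_all; try omega)

lemma pvCount_a (ms : List String) :
    List.count "acetylsalicylic acid" (pvL ms) = List.count "aspirin" (ms.map PySem.Str.lower) := by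
  induction ms with
  | nil => simp [pvL]
  | cons m t ih =>
    simp only [pvL, List.flatMap_cons, List.count_append, List.map_cons, List.count_cons] at *
    rw [pvLook_cases (PySem.Str.lower m)]
    split_ifs with h1 h2 h3 <;> (simp_all; try omega)

-- A's first loop builds exactly pvL
lemma pvA_ing (ms : List String) (acc : List String) :
    ms.foldl (fun acc med =>
      let med := PySem.Str.lower med
      if pvDb.contains med then acc ++ pvDb.getD med [] else acc) acc = acc ++ pvL ms := by
  induction ms generalizing acc with
  | nil => simp [pvL]
  | cons m t ih =>
    simp only [List.foldl_cons, pvL, List.flatMap_cons]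
    by_cases h : pvDb.contains (PySem.Str.lower m) = true
    · simp only [h, if_pos, ih, pvL, List.append_assoc]
    · have h0 : pvDb.contains (PySem.Str.lower m) = false := by
        cases hc : pvDb.contains (PySem.Str.lower m) <;> simp_all
      have hempty : pvDb.getD (PySem.Str.lower m) [] = [] :=
        PySem.Dict.getD_of_not_contains _ _ h0
      simp only [h0, Bool.false_eq_true, if_false, ih, pvL, hempty, List.nil_append]

-- B's nested loops are one fold of pvStep over pvL
lemma pvB_flat (ms : List String) (st : List String × PySem.Set String × List String) :
    ms.foldl (fun st med => (pvDb.getD (PySem.Str.lower med) []).foldl pvStep st) st =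
      (pvL ms).foldl pvStep st := by
  induction ms generalizing st with
  | nil => simp [pvL]
  | cons m t ih => simp only [List.foldl_cons, pvL, List.flatMap_cons, List.foldl_append, ih]

lemma pvFst (L : List String) (st : List String × PySem.Set String × List String) :
    (L.foldl pvStep st).1 = st.1 ++ L := by
  induction L generalizing st with
  | nil => simp
  | cons ing t ih =>
    rw [List.foldl_cons, ih]
    unfold pvStep
    split <;> simp

lemma pvOfListApp (P : List String) (x : String) :
    PySem.Set.ofList (P ++ [x]) = PySem.Set.add (PySem.Set.ofList P) x := by
  rw [PySem.Set.ofList_eq_foldl, PySem.Set.ofList_eq_foldl, List.foldl_append]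
  rfl

lemma pvDupsInv (L : List String) : ∀ (I P dups : List String),
    dups.Nodup → (∀ x, x ∈ dups ↔ 2 ≤ List.count x P) →
    ((L.foldl pvStep (I, PySem.Set.ofList P, dups)).2.2.Nodup ∧
      ∀ x, x ∈ (L.foldl pvStep (I, PySem.Set.ofList P, dups)).2.2 ↔ 2 ≤ List.count x (P ++ L)) := by
  induction L with
  | nil =>
    intro I P dups hnd hmem
    simpa using ⟨hnd, hmem⟩
  | cons ing t ih =>
    intro I P dups hnd hmem
    rw [List.foldl_cons]
    have hcount : ∀ x : String, List.count x (P ++ [ing]) =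
        List.count x P + if ing = x then 1 else 0 := by
      intro x; simp [List.count_append, List.count_cons, beq_iff_eq]
    by_cases hin : ing ∈ P
    · have hc : PySem.Set.contains (PySem.Set.ofList P) ing = true :=
        (PySem.Set.contains_iff _ _).mpr ((PySem.Set.mem_ofList _ _).mpr hin)
      have hof : PySem.Set.ofList (P ++ [ing]) = PySem.Set.ofList P := by
        rw [pvOfListApp]; simp [PySem.Set.add, hin]
      have hstep : pvStep (I, PySem.Set.ofList P, dups) ing =
          (I ++ [ing], PySem.Set.ofList (P ++ [ing]),
            if ing ∈ dups then dups else dups ++ [ing]) := by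
        simp [pvStep, hin, hof]
      rw [hstep]
      have h1 : 1 ≤ List.count ing P := List.count_pos_iff.mpr hin
      have hnd' : (if ing ∈ dups then dups else dups ++ [ing]).Nodup := by
        split
        · exact hnd
        · next hni =>
          refine List.nodup_append.mpr ⟨hnd, List.nodup_singleton _, ?_⟩
          intro a ha b hb
          simp only [List.mem_singleton] at hb
          subst hb
          exact fun h => hni (h ▸ ha)
      have hmem' : ∀ x, x ∈ (if ing ∈ dups then dups else dups ++ [ing]) ↔
          2 ≤ List.count x (P ++ [ing]) := by
        intro x
        rw [hcount x]
        by_cases hxe : ing = x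
        · subst hxe
          rw [if_pos rfl]
          by_cases hd : ing ∈ dups
          · rw [if_pos hd]
            exact ⟨fun _ => by omega, fun _ => hd⟩
          · rw [if_neg hd]
            simp only [List.mem_append, List.mem_singleton]
            exact ⟨fun _ => by omega, fun _ => by simp⟩
        · rw [if_neg hxe, Nat.add_zero]
          by_cases hd : ing ∈ dups
          · rw [if_pos hd]
            exact hmem x
          · rw [if_neg hd]
            simp only [List.mem_append, List.mem_singleton]
            constructor
            · rintro (h | h)
              · exact (hmem x).mp h
              · exact absurd h.symm hxe
            · intro h
              exact Or.inl ((hmem x).mpr h)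
      have := ih (I ++ [ing]) (P ++ [ing]) _ hnd' hmem'
      rwa [show (P ++ [ing]) ++ t = P ++ ing :: t by simp] at this
    · have hc : PySem.Set.contains (PySem.Set.ofList P) ing = false := by
        cases hb : PySem.Set.contains (PySem.Set.ofList P) ing
        · rfl
        · exact absurd ((PySem.Set.mem_ofList _ _).mp ((PySem.Set.contains_iff _ _).mp hb)) hin
      have hstep : pvStep (I, PySem.Set.ofList P, dups) ing =
          (I ++ [ing], PySem.Set.ofList (P ++ [ing]), dups) := by
        unfold pvStep
        rw [hc]
        simp only [Bool.false_eq_true, if_false, pvOfListApp]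
      rw [hstep]
      have h0 : List.count ing P = 0 := by
        by_contra h
        exact hin (List.count_pos_iff.mp (by omega))
      have hmem' : ∀ x, x ∈ dups ↔ 2 ≤ List.count x (P ++ [ing]) := by
        intro x
        rw [hcount x]
        by_cases hxe : ing = x
        · subst hxe
          rw [if_pos rfl, hmem ing]
          omega
        · rw [if_neg hxe, Nat.add_zero]
          exact hmem x
      have := ih (I ++ [ing]) (P ++ [ing]) _ hnd hmem'
      rwa [show (P ++ [ing]) ++ t = P ++ ing :: t by simp] at this

lemma pvA_dups_mem (L : List String) (x : String) :
    x ∈ PySem.Set.ofList (L.filter (fun x => 1 < PySem.List.count L x)) ↔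
      2 ≤ List.count x L := by
  rw [PySem.Set.mem_ofList, List.mem_filter]
  simp only [PySem.List.count_eq, decide_eq_true_eq]
  constructor
  · rintro ⟨_, hc⟩; omega
  · intro h; exact ⟨List.count_pos_iff.mp (by omega), by omega⟩

lemma pvListEq (l1 l2 : List String) (h1 : l1.Nodup) (h2 : l2.Nodup)
    (hm : ∀ x, x ∈ l1 ↔ x ∈ l2) (hu : ∀ x y, x ∈ l1 → y ∈ l1 → x = y) : l1 = l2 := by
  match l1, l2 with
  | [], [] => rfl
  | [], y :: t2 => exact absurd ((hm y).mpr (by simp)) (by simp)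
  | x :: t1, l2 =>
    have ht1 : t1 = [] := by
      cases t1 with
      | nil => rfl
      | cons z t =>
        have hz : x = z := hu x z (by simp) (by simp)
        rw [hz] at h1
        simp at h1
    subst ht1
    have hx2 : x ∈ l2 := (hm x).mp (by simp)
    cases l2 with
    | nil => simp at hx2
    | cons y t2 =>
      have hyx : y = x := by
        have hy := (hm y).mpr (by simp)
        simpa using hy
      subst hyx
      have ht2 : t2 = [] := by
        cases t2 with
        | nil => rfl
        | cons z t =>
          have hz := (hm z).mpr (by simp)
          simp only [List.mem_singleton] at hz
          subst hz
          simp at h2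
      rw [ht2]

lemma pv_main (ms : List String) (hpre : Pre_check_medicines ms) :
    check_medicines ms = check_medicines_alt ms := by
  simp only [Pre_check_medicines] at hpre
  simp only [check_medicines, check_medicines_alt]
  rw [pvA_ing ms [], pvB_flat ms]
  simp only [List.nil_append]
  have hinit : (PySem.Set.ofList ([] : List String)) = (PySem.Set.empty : PySem.Set String) := rfl
  have hinv := pvDupsInv (pvL ms) [] [] [] (by simp) (by intro x; simp)
  rw [hinit] at hinv
  simp only [List.nil_append] at hinv
  obtain ⟨hndB, hmemB⟩ := hinv
  have hcp := pvCount_p ms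
  have hci := pvCount_i ms
  have hca := pvCount_a ms
  have hdup : PySem.Set.ofList ((pvL ms).filter (fun x => 1 < PySem.List.count (pvL ms) x)) =
      ((pvL ms).foldl pvStep ([], PySem.Set.empty, [])).2.2 := by
    apply pvListEq
    · exact PySem.Set.nodup_ofList _
    · exact hndB
    · intro x; rw [pvA_dups_mem, hmemB]
    · intro x y hx hy
      have hx' := (pvA_dups_mem (pvL ms) x).mp hx
      have hy' := (pvA_dups_mem (pvL ms) y).mp hy
      have hxL : x ∈ pvL ms := List.count_pos_iff.mp (by omega)
      have hyL : y ∈ pvL ms := List.count_pos_iff.mp (by omega)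
      rcases pvElem ms x hxL with rfl | rfl | rfl <;>
        rcases pvElem ms y hyL with rfl | rfl | rfl <;>
        first
          | rfl
          | exact absurd (by omega) hpre
  have hst1 : ((pvL ms).foldl pvStep ([], PySem.Set.empty, [])).1 = pvL ms := by
    rw [pvFst]; rfl
  simp only [hst1]
  exact congrArg (fun d : List String =>
    [("ingredients", pvL ms),
     ("warnings", if d = [] then ([] : List String)
       else ["Duplicate ingredient risk: " ++ PySem.Str.join ", " d])]) hdup

-- ===== VERDICT (by name: the statement is the Claim_ definition above) =====
theorem check_medicines_spec : Claim_equal_check_medicines := by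
  intro ms _ hpre
  unfold Spec_check_medicines
  exact pv_main ms hpre
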